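-- pv_equiv track=rewrite | github.com/bitplane/ganban | src/ganban/ids.py | max_id
-- ===== SOURCE A (Python) =====
-- def compare_ids(left: str, right: str) -> int:
--     """Compare two IDs, padding with leading zeros.
--
--     Returns -1 if left < right, 0 if equal, 1 if left > right.
--     """
--     max_len = max(len(left), len(right))
--     left_padded = left.zfill(max_len)
--     right_padded = right.zfill(max_len)
--
--     if left_padded < right_padded:
--         return -1
--     if left_padded > right_padded:
--         return 1
--     return 0
--
-- def max_id(ids: list[str]) -> str | None:
--     """Find the highest ID from a list, or None if empty."""
--     if not ids:
--         return None
--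
--     highest = ids[0]
--     for id_ in ids[1:]:
--         if compare_ids(id_, highest) > 0:
--             highest = id_
--     return highest
-- ===== SOURCE B (Python) =====
-- def max_id(ids: list[str]) -> str | None:
--     """Find the highest ID from a list, or None if empty."""
--     if not ids:
--         return None
--     width = max(len(s) for s in ids)
--     return sorted(ids, key=lambda s: s.zfill(width), reverse=True)[0]
-- ===== Notes on version B (the rewrite author's own statement) =====
-- stated objective: alternative
-- what changed: Replaces A's single-pass running-max loop with a pairwise dynamic-padding comparator by computing one global width and stable-sorting the list descending on the fixed-width zfill key, returning the first element of the sorted list.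
-- outside the precondition, e.g. on max_id(['-9', '!!', '  x']): A returns '-9', B returns '!!'
import Mathlib
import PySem

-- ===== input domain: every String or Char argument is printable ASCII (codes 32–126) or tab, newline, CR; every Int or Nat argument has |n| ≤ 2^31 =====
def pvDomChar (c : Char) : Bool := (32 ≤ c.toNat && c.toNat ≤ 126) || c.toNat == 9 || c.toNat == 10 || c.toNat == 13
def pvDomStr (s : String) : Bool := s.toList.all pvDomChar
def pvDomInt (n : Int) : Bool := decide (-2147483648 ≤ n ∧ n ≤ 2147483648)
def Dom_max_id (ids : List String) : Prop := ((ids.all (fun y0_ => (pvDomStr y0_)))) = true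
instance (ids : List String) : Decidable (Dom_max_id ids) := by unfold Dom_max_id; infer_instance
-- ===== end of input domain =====

-- B replaces A's linear scan with a pairwise dynamic-padding comparator by a stable
-- descending sort on a precomputed fixed-width zfill key, taking the first element
-- (alternative algorithm: sort-then-head instead of a running-max loop).

-- ===== PORT A =====
def compare_ids (left right : String) : Int :=
  let max_len : Int := max (left.length : Int) (right.length : Int)
  let left_padded := PySem.Str.zfill left max_len
  let right_padded := PySem.Str.zfill right max_len
  if left_padded < right_padded then -1
  else if right_padded < left_padded then 1
  else 0

def max_id (ids : List String) : Option String :=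
  match ids with
  | [] => none
  | h :: t =>
      some (t.foldl (fun highest id_ => if compare_ids id_ highest > 0 then id_ else highest) h)

-- ===== PORT B =====
def max_id_alt (ids : List String) : Option String :=
  match ids with
  | [] => none
  | h :: t =>
      let width : Int := t.foldl (fun m s => max m (s.length : Int)) (h.length : Int)
      match PySem.List.sorted (h :: t) (fun s => PySem.Str.zfill s width) true with
      | [] => none   -- unreachable: sorting a nonempty list; makes the [0] indexing total
      | m :: _ => some m

-- ===== PRECONDITION & SPEC =====
-- Pre_ excludes lists containing a string that starts with '+' or '-': str.zfill pads
-- after the sign there, which makes A's pairwise comparator non-transitive, so which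
-- element A returns on such lists is an accident of its left-fold order.
def Pre_max_id (ids : List String) : Prop :=
  ∀ s ∈ ids, s.toList.head? ≠ some '+' ∧ s.toList.head? ≠ some '-'
instance (ids : List String) : Decidable (Pre_max_id ids) := by unfold Pre_max_id; infer_instance
def pvWitness_max_id : List String := ["007", "42", "0100"]

def Spec_max_id (ids : List String) (out : Option String) : Prop := out = max_id_alt ids
instance (ids : List String) (out : Option String) : Decidable (Spec_max_id ids out) := by unfold Spec_max_id; infer_instance

-- ===== CLAIM (what is proved, stated in full; the proofs are below) =====
def Claim_equal_max_id : Prop := ∀ (ids : List String), Dom_max_id ids → Pre_max_id ids → Spec_max_id ids (max_id ids)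

-- ===== LEMMAS AND PROOFS =====

-- A string with no leading sign is zero-filled by plain left-padding.
theorem zfill_no_sign (cs : List Char) (h : cs.head? ≠ some '+' ∧ cs.head? ≠ some '-') (L : Int) :
    PySem.Chars.zfill cs L = List.replicate (L.toNat - cs.length) '0' ++ cs := by
  unfold PySem.Chars.zfill
  by_cases hL : L ≤ (cs.length : Int)
  · have h0 : L.toNat - cs.length = 0 := by omega
    rw [if_pos hL, h0]
    simp
  · match cs with
    | [] =>
        rw [if_neg hL]
        simp
    | c :: rest =>
        have hc : ¬ (c = '+' ∨ c = '-') := by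
          rcases h with ⟨h1, h2⟩
          simp at h1 h2
          tauto
        rw [if_neg hL]
        dsimp only
        rw [if_neg hc]

-- Lex order is unchanged by prepending the same prefix to both sides.
theorem append_lt_append_iff (u a b : List Char) : (u ++ a < u ++ b) ↔ a < b := by
  induction u with
  | nil => simp
  | cons c u ih =>
      simpa [List.cons_lt_cons_iff] using ih

-- Core: for sign-free strings the zfill comparison is the same at any two widths
-- that are at least both lengths.
theorem zfill_lt_stable (x y : List Char)
    (hx : x.head? ≠ some '+' ∧ x.head? ≠ some '-')
    (hy : y.head? ≠ some '+' ∧ y.head? ≠ some '-')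
    (L M : Int)
    (hLx : (x.length : Int) ≤ L) (hLy : (y.length : Int) ≤ L)
    (hMx : (x.length : Int) ≤ M) (hMy : (y.length : Int) ≤ M) :
    (PySem.Chars.zfill x L < PySem.Chars.zfill y L) ↔
    (PySem.Chars.zfill x M < PySem.Chars.zfill y M) := by
  rw [zfill_no_sign x hx L, zfill_no_sign y hy L, zfill_no_sign x hx M, zfill_no_sign y hy M]
  have hxL : L.toNat - x.length = (L.toNat - max x.length y.length) + (max x.length y.length - x.length) := by omega
  have hyL : L.toNat - y.length = (L.toNat - max x.length y.length) + (max x.length y.length - y.length) := by omega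
  have hxM : M.toNat - x.length = (M.toNat - max x.length y.length) + (max x.length y.length - x.length) := by omega
  have hyM : M.toNat - y.length = (M.toNat - max x.length y.length) + (max x.length y.length - y.length) := by omega
  rw [hxL, hyL, hxM, hyM, List.replicate_add, List.replicate_add, List.replicate_add,
      List.replicate_add, List.append_assoc, List.append_assoc, List.append_assoc,
      List.append_assoc, append_lt_append_iff, append_lt_append_iff]

-- compare_ids written out (the lets of the definition zeta-reduced).
theorem compare_ids_eq (x h : String) :
    compare_ids x h =
      (if PySem.Str.zfill x (max (x.length : Int) (h.length : Int)) <
          PySem.Str.zfill h (max (x.length : Int) (h.length : Int)) then -1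
       else if PySem.Str.zfill h (max (x.length : Int) (h.length : Int)) <
          PySem.Str.zfill x (max (x.length : Int) (h.length : Int)) then 1 else 0) := rfl

-- A's update test equals the fixed-width key comparison, for sign-free strings
-- within the global width.
theorem compare_pos_iff (x h : String)
    (hx : x.toList.head? ≠ some '+' ∧ x.toList.head? ≠ some '-')
    (hh : h.toList.head? ≠ some '+' ∧ h.toList.head? ≠ some '-')
    (L : Int) (hLx : (x.length : Int) ≤ L) (hLh : (h.length : Int) ≤ L) :
    (compare_ids x h > 0) ↔ (PySem.Str.zfill h L < PySem.Str.zfill x L) := by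
  have hxl : ((x.toList.length : Int)) = (x.length : Int) := by simp
  have hhl : ((h.toList.length : Int)) = (h.length : Int) := by simp
  have key : (PySem.Str.zfill h (max (x.length : Int) (h.length : Int)) <
              PySem.Str.zfill x (max (x.length : Int) (h.length : Int))) ↔
             (PySem.Str.zfill h L < PySem.Str.zfill x L) := by
    rw [String.lt_iff_toList_lt, String.lt_iff_toList_lt, PySem.Str.toList_zfill,
        PySem.Str.toList_zfill, PySem.Str.toList_zfill, PySem.Str.toList_zfill]
    exact zfill_lt_stable h.toList x.toList hh hx _ L
      (by rw [hhl]; exact le_max_right _ _) (by rw [hxl]; exact le_max_left _ _)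
      (by rw [hhl]; exact hLh) (by rw [hxl]; exact hLx)
  rw [compare_ids_eq, ← key]
  split_ifs with h1 h2
  · exact iff_of_false (by norm_num) (lt_asymm h1)
  · exact iff_of_true (by norm_num) h2
  · exact iff_of_false (by norm_num) h2

-- A's fold equals the running first-max under the fixed-width key, given that every
-- element (hence every accumulator) is sign-free and no longer than the width L.
theorem fold_eq (t : List String) (h : String) (L : Int)
    (hsf : ∀ s ∈ h :: t, s.toList.head? ≠ some '+' ∧ s.toList.head? ≠ some '-')
    (hlen : ∀ s ∈ h :: t, (s.length : Int) ≤ L) :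
    t.foldl (fun highest id_ => if compare_ids id_ highest > 0 then id_ else highest) h =
    t.foldl (fun m x => if PySem.Str.zfill m L < PySem.Str.zfill x L then x else m) h := by
  induction t generalizing h with
  | nil => rfl
  | cons x t ih =>
      have hx := hsf x (by simp)
      have hh := hsf h (by simp)
      have hcond := compare_pos_iff x h hx hh L (hlen x (by simp)) (hlen h (by simp))
      have hstep : (if compare_ids x h > 0 then x else h) =
          (if PySem.Str.zfill h L < PySem.Str.zfill x L then x else h) := by
        by_cases hc : compare_ids x h > 0
        · rw [if_pos hc, if_pos (hcond.mp hc)]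
        · rw [if_neg hc, if_neg (fun hlt => hc (hcond.mpr hlt))]
      rw [List.foldl_cons, List.foldl_cons, hstep]
      split_ifs with hc
      · exact ih x (fun s hs => hsf s (by simp at hs ⊢; tauto))
          (fun s hs => hlen s (by simp at hs ⊢; tauto))
      · exact ih h (fun s hs => hsf s (by simp at hs ⊢; tauto))
          (fun s hs => hlen s (by simp at hs ⊢; tauto))

-- One-step unfolding of insertBy on a cons.
theorem insertBy_cons (before : String → String → Bool) (x y : String) (ys : List String) :
    PySem.List.insertBy before x (y :: ys) =
    if before x y then x :: y :: ys else y :: PySem.List.insertBy before x ys := rfl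

-- Head of the descending insertion-sort accumulator = running first-max by key.
theorem head_foldl_insertBy (key : String → String) (t : List String) (m : String) (rest : List String) :
    (t.foldl (fun acc x => PySem.List.insertBy (fun a b => decide (key b < key a)) x acc) (m :: rest)).head? =
    some (t.foldl (fun acc x => if key acc < key x then x else acc) m) := by
  induction t generalizing m rest with
  | nil => rfl
  | cons x t ih =>
      rw [List.foldl_cons, List.foldl_cons]
      by_cases hc : key m < key x
      · have : PySem.List.insertBy (fun a b => decide (key b < key a)) x (m :: rest) =
            x :: m :: rest := by
          unfold PySem.List.insertBy
          simp [hc]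
        rw [this, if_pos hc]
        exact ih x (m :: rest)
      · have : PySem.List.insertBy (fun a b => decide (key b < key a)) x (m :: rest) =
            m :: PySem.List.insertBy (fun a b => decide (key b < key a)) x rest := by
          rw [insertBy_cons]
          simp [hc]
        rw [this, if_neg hc]
        exact ih m _

-- Head of the stable descending sort of a nonempty list = running first-max by key.
theorem head_sorted_rev (key : String → String) (h : String) (t : List String) :
    (PySem.List.sorted (h :: t) key true).head? =
    some (t.foldl (fun acc x => if key acc < key x then x else acc) h) := by
  rw [PySem.List.sorted_rev_eq_foldl_insertBy, List.foldl_cons]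
  have h1 : PySem.List.insertBy (fun a b => decide (key b < key a)) h ([] : List String) = [h] := by
    unfold PySem.List.insertBy
    rfl
  rw [h1]
  exact head_foldl_insertBy key t h []

-- ===== VERDICT (by name: the statement is the Claim_ definition above) =====
theorem max_id_spec : Claim_equal_max_id := by
  intro ids _ hpre
  unfold Spec_max_id
  match ids, hpre with
  | [], _ => rfl
  | h :: t, hpre =>
      unfold max_id max_id_alt
      dsimp only
      set L : Int := t.foldl (fun m s => max m (s.length : Int)) (h.length : Int) with hLdef
      have hmax := PySem.List.le_foldl_max (t.map (fun s => (s.length : Int))) ((h.length : Int))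
      rw [List.foldl_map] at hmax
      have hlen : ∀ s ∈ h :: t, (s.length : Int) ≤ L := by
        intro s hs
        rcases List.mem_cons.mp hs with rfl | hs
        · exact hmax.1
        · exact hmax.2 _ (List.mem_map_of_mem hs)
      have hhead := head_sorted_rev (fun s => PySem.Str.zfill s L) h t
      rcases hs : PySem.List.sorted (h :: t) (fun s => PySem.Str.zfill s L) true with _ | ⟨m, rest⟩
      · rw [hs] at hhead; simp at hhead
      · rw [hs] at hhead
        simp only [List.head?] at hhead
        have hm : m = t.foldl (fun acc x => if PySem.Str.zfill acc L < PySem.Str.zfill x L then x else acc) h := by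
          injection hhead
        rw [hm]
        exact congrArg some (fold_eq t h L hpre hlen)
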